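-- pv_equiv track=rewrite | github.com/JaimeCernuda/agentic-deployment-engine | examples/Context Management A2A/test_context.py | generate_filler_text
-- ===== SOURCE A (Python) =====
-- def generate_filler_text(paragraphs: int = 50) -> str:
--     """Generate filler text with irrelevant information."""
--     filler_topics = [
--         "The weather today has been quite variable with occasional sunshine breaking through the clouds. "
--         "Many people enjoy spending time outdoors when the conditions are favorable. "
--         "The local park has been particularly busy with families and joggers alike.",
--
--         "Technology continues to evolve at an unprecedented pace. New smartphones are released every year "
--         "with improved cameras and faster processors. The integration of artificial intelligence into "
--         "daily applications has transformed how we interact with our devices.",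
--
--         "Cooking has become a popular hobby for many people during recent years. From simple recipes "
--         "to gourmet dishes, the variety of cuisines available to explore is endless. Online tutorials "
--         "and cooking shows have made it easier than ever to learn new techniques.",
--
--         "The history of ancient civilizations continues to fascinate researchers and enthusiasts alike. "
--         "Archaeological discoveries provide new insights into how our ancestors lived, worked, and "
--         "built societies that laid the foundations for modern civilization.",
--
--         "Sports bring communities together and promote physical health and wellbeing. Whether it's "
--         "team sports like football and basketball, or individual pursuits like running and swimming, "
--         "regular physical activity has numerous benefits for both body and mind.",
--
--         "Music has the power to evoke emotions and create lasting memories. From classical symphonies "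
--         "to modern pop hits, the diversity of musical genres reflects the rich tapestry of human "
--         "creativity and cultural expression across different societies and eras.",
--
--         "Environmental conservation has become increasingly important in recent decades. Efforts to "
--         "protect endangered species, reduce pollution, and combat climate change require collective "
--         "action from governments, businesses, and individuals around the world.",
--
--         "Literature offers windows into different worlds, perspectives, and experiences. Whether "
--         "through fiction or non-fiction, books have the power to educate, entertain, and inspire "
--         "readers of all ages. Libraries remain important community resources for access to knowledge.",
--
--         "Travel broadens the mind and exposes us to different cultures and ways of life. Exploring "
--         "new places, trying local cuisines, and meeting people from diverse backgrounds can be "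
--         "transformative experiences that foster understanding and appreciation.",
--
--         "The study of astronomy reveals the vastness of the universe and our place within it. "
--         "From distant galaxies to nearby planets, the cosmos continues to inspire wonder and drive "
--         "scientific exploration through advanced telescopes and space missions."
--     ]
--
--     text_blocks = []
--     for i in range(paragraphs):
--         text_blocks.append(filler_topics[i % len(filler_topics)])
--
--     return "\n\n".join(text_blocks)
-- ===== SOURCE B (Python) =====
-- def generate_filler_text(paragraphs: int = 50) -> str:
--     """Generate filler text with irrelevant information."""
--     filler_topics = [
--         "The weather today has been quite variable with occasional sunshine breaking through the clouds. "
--         "Many people enjoy spending time outdoors when the conditions are favorable. "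
--         "The local park has been particularly busy with families and joggers alike.",
--
--         "Technology continues to evolve at an unprecedented pace. New smartphones are released every year "
--         "with improved cameras and faster processors. The integration of artificial intelligence into "
--         "daily applications has transformed how we interact with our devices.",
--
--         "Cooking has become a popular hobby for many people during recent years. From simple recipes "
--         "to gourmet dishes, the variety of cuisines available to explore is endless. Online tutorials "
--         "and cooking shows have made it easier than ever to learn new techniques.",
--
--         "The history of ancient civilizations continues to fascinate researchers and enthusiasts alike. "
--         "Archaeological discoveries provide new insights into how our ancestors lived, worked, and "
--         "built societies that laid the foundations for modern civilization.",
--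
--         "Sports bring communities together and promote physical health and wellbeing. Whether it's "
--         "team sports like football and basketball, or individual pursuits like running and swimming, "
--         "regular physical activity has numerous benefits for both body and mind.",
--
--         "Music has the power to evoke emotions and create lasting memories. From classical symphonies "
--         "to modern pop hits, the diversity of musical genres reflects the rich tapestry of human "
--         "creativity and cultural expression across different societies and eras.",
--
--         "Environmental conservation has become increasingly important in recent decades. Efforts to "
--         "protect endangered species, reduce pollution, and combat climate change require collective "
--         "action from governments, businesses, and individuals around the world.",
--
--         "Literature offers windows into different worlds, perspectives, and experiences. Whether "
--         "through fiction or non-fiction, books have the power to educate, entertain, and inspire "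
--         "readers of all ages. Libraries remain important community resources for access to knowledge.",
--
--         "Travel broadens the mind and exposes us to different cultures and ways of life. Exploring "
--         "new places, trying local cuisines, and meeting people from diverse backgrounds can be "
--         "transformative experiences that foster understanding and appreciation.",
--
--         "The study of astronomy reveals the vastness of the universe and our place within it. "
--         "From distant galaxies to nearby planets, the cosmos continues to inspire wonder and drive "
--         "scientific exploration through advanced telescopes and space missions."
--     ]
--
--     full, rem = divmod(max(paragraphs, 0), len(filler_topics))
--     return "\n\n".join(filler_topics * full + filler_topics[:rem])
-- ===== Notes on version B (the rewrite author's own statement) =====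
-- stated objective: simpler
-- what changed: Replaces the per-paragraph modular-index append loop with a closed-form construction: divmod the (clamped) count by the number of topics and build the block list as full replications of the topic list plus a prefix slice, then join.
import Mathlib
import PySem

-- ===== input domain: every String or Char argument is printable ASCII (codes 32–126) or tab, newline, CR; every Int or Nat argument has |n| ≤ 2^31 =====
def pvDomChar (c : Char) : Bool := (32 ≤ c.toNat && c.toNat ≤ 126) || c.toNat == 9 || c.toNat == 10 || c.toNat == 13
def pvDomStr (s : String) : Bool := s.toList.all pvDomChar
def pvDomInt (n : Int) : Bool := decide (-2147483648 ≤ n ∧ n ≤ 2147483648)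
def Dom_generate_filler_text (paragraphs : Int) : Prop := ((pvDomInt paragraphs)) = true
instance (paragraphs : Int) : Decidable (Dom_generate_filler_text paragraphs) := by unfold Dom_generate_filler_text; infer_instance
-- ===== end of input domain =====

-- B replaces A's per-paragraph modular-index append loop by a closed-form divmod:
-- full replications of the topic list plus a prefix slice, then join (objective: simpler).

-- the fixed topic list both versions draw from (module constant of the function)
def fillerTopics : List String := [
  "The weather today has been quite variable with occasional sunshine breaking through the clouds. Many people enjoy spending time outdoors when the conditions are favorable. The local park has been particularly busy with families and joggers alike.",
  "Technology continues to evolve at an unprecedented pace. New smartphones are released every year with improved cameras and faster processors. The integration of artificial intelligence into daily applications has transformed how we interact with our devices.",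
  "Cooking has become a popular hobby for many people during recent years. From simple recipes to gourmet dishes, the variety of cuisines available to explore is endless. Online tutorials and cooking shows have made it easier than ever to learn new techniques.",
  "The history of ancient civilizations continues to fascinate researchers and enthusiasts alike. Archaeological discoveries provide new insights into how our ancestors lived, worked, and built societies that laid the foundations for modern civilization.",
  "Sports bring communities together and promote physical health and wellbeing. Whether it's team sports like football and basketball, or individual pursuits like running and swimming, regular physical activity has numerous benefits for both body and mind.",
  "Music has the power to evoke emotions and create lasting memories. From classical symphonies to modern pop hits, the diversity of musical genres reflects the rich tapestry of human creativity and cultural expression across different societies and eras.",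
  "Environmental conservation has become increasingly important in recent decades. Efforts to protect endangered species, reduce pollution, and combat climate change require collective action from governments, businesses, and individuals around the world.",
  "Literature offers windows into different worlds, perspectives, and experiences. Whether through fiction or non-fiction, books have the power to educate, entertain, and inspire readers of all ages. Libraries remain important community resources for access to knowledge.",
  "Travel broadens the mind and exposes us to different cultures and ways of life. Exploring new places, trying local cuisines, and meeting people from diverse backgrounds can be transformative experiences that foster understanding and appreciation.",
  "The study of astronomy reveals the vastness of the universe and our place within it. From distant galaxies to nearby planets, the cosmos continues to inspire wonder and drive scientific exploration through advanced telescopes and space missions."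
]

-- ===== PORT A =====
-- 'filler_topics[i % len(filler_topics)]': the index is always in range (0 ≤ i % 10 < 10),
-- so pyGetD with a default is exact here (the default is never returned).
def generate_filler_text (paragraphs : Int) : String :=
  let text_blocks : List String :=
    (PySem.List.pyRange 0 paragraphs 1).foldl
      (fun acc i => acc ++ [PySem.List.pyGetD fillerTopics (PySem.Int.mod i (fillerTopics.length : Int)) ""]) []
  PySem.Str.join "\n\n" text_blocks

-- ===== PORT B =====
def generate_filler_text_alt (paragraphs : Int) : String :=
  let n := max paragraphs 0
  let full := PySem.Int.floordiv n (fillerTopics.length : Int)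
  let rem := PySem.Int.mod n (fillerTopics.length : Int)
  PySem.Str.join "\n\n"
    ((List.replicate full.toNat fillerTopics).flatten ++ PySem.List.slice fillerTopics none (some rem))

-- ===== PRECONDITION & SPEC =====
def Spec_generate_filler_text (paragraphs : Int) (out : String) : Prop := out = generate_filler_text_alt paragraphs
instance (paragraphs : Int) (out : String) : Decidable (Spec_generate_filler_text paragraphs out) := by unfold Spec_generate_filler_text; infer_instance

-- ===== CLAIM (what is proved, stated in full; the proofs are below) =====
def Claim_equal_generate_filler_text : Prop := ∀ (paragraphs : Int), Dom_generate_filler_text paragraphs → Spec_generate_filler_text paragraphs (generate_filler_text paragraphs)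

-- ===== LEMMAS AND PROOFS =====

theorem fillerTopics_length : fillerTopics.length = 10 := by rfl

-- A's loop over range(n) builds exactly full replications plus the prefix of length n % 10.
theorem loop_eq (n : Nat) :
    (PySem.List.pyRange 0 (n : Int) 1).foldl
      (fun acc i => acc ++ [PySem.List.pyGetD fillerTopics (PySem.Int.mod i (fillerTopics.length : Int)) ""]) []
    = (List.replicate (n / 10) fillerTopics).flatten ++ fillerTopics.take (n % 10) := by
  induction n with
  | zero => simp [PySem.List.pyRange_one_eq_nil]
  | succ n ih =>
      have hcast : ((n + 1 : Nat) : Int) = (n : Int) + 1 := by push_cast; ring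
      rw [hcast, PySem.List.pyRange_one_succ_right (by positivity), List.foldl_append, ih]
      simp only [List.foldl_cons, List.foldl_nil, fillerTopics_length]
      rw [show PySem.Int.mod (n : Int) ((10 : Nat) : Int) = ((n % 10 : Nat) : Int) from
            PySem.Int.mod_natCast n 10]
      rw [PySem.List.pyGetD_natCast]
      have hlt : n % 10 < fillerTopics.length := by rw [fillerTopics_length]; omega
      have hstep : fillerTopics.take (n % 10) ++ [fillerTopics.getD (n % 10) ""]
          = fillerTopics.take (n % 10 + 1) := by
        rw [List.take_add_one, List.getElem?_eq_getElem hlt, List.getD_eq_getElem _ _ hlt]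
        rfl
      rw [List.append_assoc, hstep]
      by_cases h9 : n % 10 = 9
      · have hdiv : (n + 1) / 10 = n / 10 + 1 := by omega
        have hmod : (n + 1) % 10 = 0 := by omega
        rw [hdiv, hmod, h9, List.replicate_succ', List.flatten_append]
        simp [List.take_of_length_le (by rw [fillerTopics_length])]
      · have hdiv : (n + 1) / 10 = n / 10 := by omega
        have hmod : (n + 1) % 10 = n % 10 + 1 := by omega
        rw [hdiv, hmod]

-- ===== VERDICT (by name: the statement is the Claim_ definition above) =====
theorem generate_filler_text_spec : Claim_equal_generate_filler_text := by
  intro p _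
  unfold Spec_generate_filler_text generate_filler_text generate_filler_text_alt
  by_cases hp : 0 ≤ p
  · obtain ⟨n, rfl⟩ := Int.eq_ofNat_of_zero_le hp
    rw [loop_eq n, max_eq_left (by exact_mod_cast Int.natCast_nonneg n)]
    simp only [fillerTopics_length]
    rw [show PySem.Int.floordiv (n : Int) ((10 : Nat) : Int) = ((n / 10 : Nat) : Int) from
          PySem.Int.floordiv_natCast n 10,
        show PySem.Int.mod (n : Int) ((10 : Nat) : Int) = ((n % 10 : Nat) : Int) from
          PySem.Int.mod_natCast n 10,
        PySem.List.slice_to fillerTopics (Int.natCast_nonneg _)]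
    have h1 : ((n : Int) / 10).toNat = n / 10 := by omega
    have h2 : ((n : Int) % 10).toNat = n % 10 := by omega
    simp [h1, h2]
  · rw [PySem.List.pyRange_one_eq_nil (by omega), max_eq_right (by omega)]
    simp [PySem.Int.floordiv, PySem.Int.mod, PySem.List.slice]
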